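-- pv_equiv track=rewrite | github.com/gekowa/ascend-opp | op_impl/built-in/ai_core/tbe/impl/concat_l1fusion.py | get_offset_and_mask
-- ===== SOURCE A (Python) =====
-- def get_offset_and_mask(dim, shape_list, output_shape,
--                         align_len):
--     """
--     get offset and mask
--     for exp:
--        input:
--          align_len = 8 (fp32)
--          input_1 = [n, 16]
--          input_2 = [n, 12]
--          output = [n, 28]
--        output:
--          min_align = 2
--          start_offset_all = [[0, 28], [16, 44]]
--          mask_value_all = [[[0, 2, 0], [4, 1, 4]], [[0, 1, 4], [4, 1, 0]]]
--
--     Parameters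
--     ----------
--     dim: int
--         concat axis
--     shape_list: list
--         input shape list for concat
--     output_shape: list
--         output shape for concat
--     align_len: int
--         ele number in one block
--
--     Returns
--     -------
--     loop_list : list
--          min align loop num per input
--     start_offset_all : list
--         the offset in the align loop num for inputs
--     mask_value_all: list
--         the mask in the align loop num for inputs
--         [first_mask, repeat, last_mask]
--         repeat = align_len // align_len
--     """
--     offset = 0
--     start_offset_all = []
--     mask_value_all = []
--     loop_list = []
--     for _, input_index in enumerate(range(len(shape_list))):
--         # calcu repeat loop with input and output
--         mask_value = []
--         start_offset = []
--         concat_size = shape_list[input_index][dim]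
--         loop_idx = 0
--         input_offset_list = []
--
--         for idx, _ in enumerate(range(align_len)):
--             # calcu input and output align loop for each input
--             input_offset = (concat_size*idx) % align_len
--             output_offset = (output_shape[dim]*idx) % align_len
--             input_offset_list.append(input_offset)
--             if len(input_offset_list) == 1:
--                 pass
--             elif input_offset == output_offset \
--                     and input_offset == input_offset_list[0]:
--                 loop_idx = idx
--                 break
--             else:
--                 loop_idx = align_len
--
--             mask_1 = \
--                 align_len \
--                 - ((offset + output_shape[dim]*idx) % align_len)
--             mask_1 = mask_1 % align_len
--             mask_1 = mask_1 % align_len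
--             mask_2 = (concat_size - mask_1) // align_len
--             mask_3 = (concat_size - mask_1) % align_len
--
--             mask_value.append([mask_1, mask_2, mask_3])
--             start_offset.append(offset + output_shape[dim]*idx)
--
--         loop_list.append(loop_idx)
--         start_offset_all.append(start_offset)
--         mask_value_all.append(mask_value)
--         offset = offset + concat_size
--
--     return loop_list, start_offset_all, mask_value_all
-- ===== SOURCE B (Python) =====
-- def _gcd(a, b):
--     # Euclid's algorithm (hand-written: the original module imports no math)
--     a, b = abs(a), abs(b)
--     if b == 0:
--         return a
--     return _gcd(b, a % b)
--
--
-- def get_offset_and_mask(dim, shape_list, output_shape, align_len):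
--     """Closed-form alignment period via gcd/lcm instead of A's cycle-detection break loop."""
--     loop_list = []
--     start_offset_all = []
--     mask_value_all = []
--     offset = 0
--     for shape in shape_list:
--         concat_size = shape[dim]
--         if align_len >= 1:
--             out_size = output_shape[dim]
--             pc = align_len // _gcd(concat_size, align_len)
--             po = align_len // _gcd(out_size, align_len)
--             period = pc * po // _gcd(pc, po)
--         else:
--             period = 0
--         start_offset = []
--         mask_value = []
--         for idx in range(period):
--             so = offset + output_shape[dim] * idx
--             mask_1 = (align_len - so % align_len) % align_len
--             mask_2 = (concat_size - mask_1) // align_len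
--             mask_3 = (concat_size - mask_1) % align_len
--             start_offset.append(so)
--             mask_value.append([mask_1, mask_2, mask_3])
--         loop_list.append(period)
--         start_offset_all.append(start_offset)
--         mask_value_all.append(mask_value)
--         offset += concat_size
--     return loop_list, start_offset_all, mask_value_all
-- ===== Notes on version B (the rewrite author's own statement) =====
-- stated objective: alternative
-- what changed: Replaces A's inner cycle-detection loop (tracking input_offset_list and breaking on the first repeated alignment state) with a closed-form alignment period computed via a hand-written gcd/lcm, followed by one plain loop of exactly that many iterations per input.
-- intended difference: When align_len == 1 and shape_list is nonempty, A puts 0 in loop_list for every input (its else branch never runs, so the loop_idx = 0 initialiser leaks out) even though one offset/mask entry exists per input; B returns the true alignment period 1, the loop count a consumer needs. — e.g. on get_offset_and_mask(0, [[2]], [2], 1): A returns ([0], [[0]], [[[0, 2, 0]]]), B returns ([1], [[0]], [[[0, 2, 0]]])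
import Mathlib
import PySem

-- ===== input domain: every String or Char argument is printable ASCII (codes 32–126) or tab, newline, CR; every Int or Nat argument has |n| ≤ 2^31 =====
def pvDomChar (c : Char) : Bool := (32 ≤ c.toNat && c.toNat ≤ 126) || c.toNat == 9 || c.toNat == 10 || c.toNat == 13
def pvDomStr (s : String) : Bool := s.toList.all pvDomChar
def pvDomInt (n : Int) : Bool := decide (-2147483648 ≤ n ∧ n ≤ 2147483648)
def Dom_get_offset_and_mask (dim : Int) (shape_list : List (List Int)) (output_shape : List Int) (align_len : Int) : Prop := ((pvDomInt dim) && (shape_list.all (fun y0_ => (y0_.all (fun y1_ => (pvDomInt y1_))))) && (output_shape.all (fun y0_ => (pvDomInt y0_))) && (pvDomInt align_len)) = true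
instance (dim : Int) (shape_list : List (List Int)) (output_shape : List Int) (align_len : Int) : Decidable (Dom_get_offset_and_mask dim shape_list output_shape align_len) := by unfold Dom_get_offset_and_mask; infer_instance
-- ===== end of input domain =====

-- B replaces A's cycle-detection break loop by a closed-form gcd/lcm alignment period (alternative
-- decomposition, similar cost); on align_len == 1 with nonempty shape_list A's loop_list holds the
-- leftover sentinel 0 while B reports the true period 1 (stated as D_ below).

-- ===== PORT A =====
-- mask triple computed after the if/elif/else in A's inner loop
def pvMaskA (concat_size : Int) (o_d : Int) (offset : Int) (align_len : Int) (idx : Int) : List Int :=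
  let mask_1a := align_len - PySem.Int.mod (offset + o_d * idx) align_len
  let mask_1b := PySem.Int.mod mask_1a align_len
  let mask_1 := PySem.Int.mod mask_1b align_len
  let mask_2 := PySem.Int.floordiv (concat_size - mask_1) align_len
  let mask_3 := PySem.Int.mod (concat_size - mask_1) align_len
  [mask_1, mask_2, mask_3]

-- A's inner 'for idx in range(align_len)' loop with its early break; state
-- (mask_value, start_offset, loop_idx, input_offset_list) exactly as in the Python.
def pvInnerA (concat_size : Int) (o_d : Int) (offset : Int) (align_len : Int) :
    List Int → List (List Int) → List Int → Int → List Int →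
    List (List Int) × List Int × Int
  | [], mask_value, start_offset, loop_idx, _ => (mask_value, start_offset, loop_idx)
  | idx :: rest, mask_value, start_offset, loop_idx, input_offset_list =>
    let input_offset := PySem.Int.mod (concat_size * idx) align_len
    let output_offset := PySem.Int.mod (o_d * idx) align_len
    let iol := input_offset_list ++ [input_offset]
    if iol.length = 1 then
      pvInnerA concat_size o_d offset align_len rest
        (mask_value ++ [pvMaskA concat_size o_d offset align_len idx])
        (start_offset ++ [offset + o_d * idx]) loop_idx iol
    else if input_offset = output_offset ∧ input_offset = iol.headD 0 then
      (mask_value, start_offset, idx)          -- break (before the appends)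
    else
      pvInnerA concat_size o_d offset align_len rest
        (mask_value ++ [pvMaskA concat_size o_d offset align_len idx])
        (start_offset ++ [offset + o_d * idx]) align_len iol

-- body of A's outer loop: state (offset, loop_list, start_offset_all, mask_value_all)
def pvStepA (dim : Int) (output_shape : List Int) (align_len : Int)
    (st : Int × List Int × List (List Int) × List (List (List Int))) (shape : List Int) :
    Int × List Int × List (List Int) × List (List (List Int)) :=
  let offset := st.1
  let concat_size := PySem.List.pyGetD shape dim 0
  let o_d := PySem.List.pyGetD output_shape dim 0
  let r := pvInnerA concat_size o_d offset align_len
             (PySem.List.pyRange 0 align_len 1) [] [] 0 []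
  (offset + concat_size, st.2.1 ++ [r.2.2], st.2.2.1 ++ [r.2.1], st.2.2.2 ++ [r.1])

def get_offset_and_mask (dim : Int) (shape_list : List (List Int)) (output_shape : List Int) (align_len : Int) : List Int × List (List Int) × List (List (List Int)) :=
  -- 'for _, input_index in enumerate(range(len(shape_list)))' with indexing; the outer index is
  -- always in range, output_shape[dim]/shape[dim] are total forms pyGetD (Pre_ excludes IndexError)
  let st := (PySem.List.pyRange 0 shape_list.length 1).foldl
    (fun st i => pvStepA dim output_shape align_len st (PySem.List.pyGetD shape_list i []))
    (0, [], [], [])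
  (st.2.1, st.2.2.1, st.2.2.2)

-- ===== PORT B =====
-- hand-written Euclid from Source B (the source module imports no math); structural on a fuel
-- argument so the kernel reduces it — fuel b+1 is exact, the second argument strictly decreases
def pvGcdRec : Nat → Nat → Nat → Nat
  | 0, a, _ => a
  | _ + 1, a, 0 => a
  | f + 1, a, b + 1 => pvGcdRec f (b + 1) (a % (b + 1))

def pvGcd (x y : Int) : Int := (pvGcdRec (y.natAbs + 1) x.natAbs y.natAbs : Nat)

-- pc = align_len // gcd(concat, align); po likewise; period = lcm(pc, po)
def pvPeriod (concat_size o_d align_len : Int) : Int :=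
  let pc := PySem.Int.floordiv align_len (pvGcd concat_size align_len)
  let po := PySem.Int.floordiv align_len (pvGcd o_d align_len)
  PySem.Int.floordiv (pc * po) (pvGcd pc po)

-- Source B's single plain loop over range(period) building the two lists
def pvBuildB (concat_size o_d offset align_len period : Int) : List Int × List (List Int) :=
  (PySem.List.pyRange 0 period 1).foldl
    (fun (p : List Int × List (List Int)) idx =>
      let so := offset + o_d * idx
      let mask_1 := PySem.Int.mod (align_len - PySem.Int.mod so align_len) align_len
      (p.1 ++ [so],
       p.2 ++ [[mask_1, PySem.Int.floordiv (concat_size - mask_1) align_len,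
                PySem.Int.mod (concat_size - mask_1) align_len]]))
    ([], [])

-- recursion over shape_list carrying only the running offset
def pvAltGo (dim : Int) (output_shape : List Int) (align_len : Int) :
    List (List Int) → Int → List Int × List (List Int) × List (List (List Int))
  | [], _ => ([], [], [])
  | shape :: rest, offset =>
    let concat_size := PySem.List.pyGetD shape dim 0
    let period :=
      if 1 ≤ align_len then
        pvPeriod concat_size (PySem.List.pyGetD output_shape dim 0) align_len
      else 0
    let pr := pvBuildB concat_size (PySem.List.pyGetD output_shape dim 0) offset align_len period
    let r := pvAltGo dim output_shape align_len rest (offset + concat_size)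
    (period :: r.1, pr.1 :: r.2.1, pr.2 :: r.2.2)

def get_offset_and_mask_alt (dim : Int) (shape_list : List (List Int)) (output_shape : List Int) (align_len : Int) : List Int × List (List Int) × List (List (List Int)) :=
  pvAltGo dim output_shape align_len shape_list 0

-- ===== PRECONDITION & SPEC =====
-- Pre_ excludes exactly the IndexError inputs: shape[dim] is read for every shape in shape_list,
-- and output_shape[dim] is read only when the inner loop runs (shape_list nonempty, align_len ≥ 1).
def Pre_get_offset_and_mask (dim : Int) (shape_list : List (List Int)) (output_shape : List Int) (align_len : Int) : Prop :=
  (∀ s ∈ shape_list, PySem.Raise.InRange s.length dim) ∧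
  (shape_list = [] ∨ align_len < 1 ∨ PySem.Raise.InRange output_shape.length dim)
instance (dim : Int) (shape_list : List (List Int)) (output_shape : List Int) (align_len : Int) : Decidable (Pre_get_offset_and_mask dim shape_list output_shape align_len) := by unfold Pre_get_offset_and_mask; infer_instance

def pvWitness_get_offset_and_mask : Int × List (List Int) × List Int × Int := (0, [[5], [3]], [8], 4)

-- When align_len == 1 and shape_list is nonempty, A returns 0 in loop_list for every input (its
-- else branch never runs, so the loop_idx = 0 initialiser leaks out) although one offset/mask entry
-- exists per input; B returns the true alignment period 1, the loop count a consumer needs.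
def D_get_offset_and_mask (dim : Int) (shape_list : List (List Int)) (output_shape : List Int) (align_len : Int) : Prop :=
  align_len = 1 ∧ shape_list ≠ []
instance (dim : Int) (shape_list : List (List Int)) (output_shape : List Int) (align_len : Int) : Decidable (D_get_offset_and_mask dim shape_list output_shape align_len) := by unfold D_get_offset_and_mask; infer_instance

def Spec_get_offset_and_mask (dim : Int) (shape_list : List (List Int)) (output_shape : List Int) (align_len : Int) (out : List Int × List (List Int) × List (List (List Int))) : Prop := ¬ D_get_offset_and_mask dim shape_list output_shape align_len → out = get_offset_and_mask_alt dim shape_list output_shape align_len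
instance (dim : Int) (shape_list : List (List Int)) (output_shape : List Int) (align_len : Int) (out : List Int × List (List Int) × List (List (List Int))) : Decidable (Spec_get_offset_and_mask dim shape_list output_shape align_len out) := by unfold Spec_get_offset_and_mask; infer_instance

def pvDiffWitness_get_offset_and_mask : Int × List (List Int) × List Int × Int := (0, [[2]], [2], 1)
def pvDiffWitnessOut_get_offset_and_mask : (List Int × List (List Int) × List (List (List Int))) × (List Int × List (List Int) × List (List (List Int))) :=
  (([0], [[0]], [[[0, 2, 0]]]), ([1], [[0]], [[[0, 2, 0]]]))

-- ===== CLAIM (what is proved, stated in full; the proofs are below) =====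
def Claim_unchanged_get_offset_and_mask : Prop := ∀ (dim : Int) (shape_list : List (List Int)) (output_shape : List Int) (align_len : Int), Dom_get_offset_and_mask dim shape_list output_shape align_len → Pre_get_offset_and_mask dim shape_list output_shape align_len → Spec_get_offset_and_mask dim shape_list output_shape align_len (get_offset_and_mask dim shape_list output_shape align_len)
def Claim_changed_get_offset_and_mask : Prop := Dom_get_offset_and_mask (pvDiffWitness_get_offset_and_mask.1) (pvDiffWitness_get_offset_and_mask.2.1) (pvDiffWitness_get_offset_and_mask.2.2.1) (pvDiffWitness_get_offset_and_mask.2.2.2) ∧ Pre_get_offset_and_mask (pvDiffWitness_get_offset_and_mask.1) (pvDiffWitness_get_offset_and_mask.2.1) (pvDiffWitness_get_offset_and_mask.2.2.1) (pvDiffWitness_get_offset_and_mask.2.2.2) ∧ D_get_offset_and_mask (pvDiffWitness_get_offset_and_mask.1) (pvDiffWitness_get_offset_and_mask.2.1) (pvDiffWitness_get_offset_and_mask.2.2.1) (pvDiffWitness_get_offset_and_mask.2.2.2) ∧ get_offset_and_mask (pvDiffWitness_get_offset_and_mask.1) (pvDiffWitness_get_offset_and_mask.2.1) (pvDiffWitness_get_offset_and_mask.2.2.1)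 (pvDiffWitness_get_offset_and_mask.2.2.2) = pvDiffWitnessOut_get_offset_and_mask.1 ∧ get_offset_and_mask_alt (pvDiffWitness_get_offset_and_mask.1) (pvDiffWitness_get_offset_and_mask.2.1) (pvDiffWitness_get_offset_and_mask.2.2.1) (pvDiffWitness_get_offset_and_mask.2.2.2) = pvDiffWitnessOut_get_offset_and_mask.2 ∧ pvDiffWitnessOut_get_offset_and_mask.1 ≠ pvDiffWitnessOut_get_offset_and_mask.2
def Claim_exact_get_offset_and_mask : Prop := ∀ (dim : Int) (shape_list : List (List Int)) (output_shape : List Int) (align_len : Int), Dom_get_offset_and_mask dim shape_list output_shape align_len → Pre_get_offset_and_mask dim shape_list output_shape align_len → D_get_offset_and_mask dim shape_list output_shape align_len → get_offset_and_mask dim shape_list output_shape align_len ≠ get_offset_and_mask_alt dim shape_list output_shape align_len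

-- ===== LEMMAS AND PROOFS =====

-- proof-side form of the mask triple both programs compute (B's single outer mod)
def pvMaskB (c o off a idx : Int) : List Int :=
  let m1 := PySem.Int.mod (a - PySem.Int.mod (off + o * idx) a) a
  [m1, PySem.Int.floordiv (c - m1) a, PySem.Int.mod (c - m1) a]

lemma pvGcdRec_eq (f a b : Nat) (h : b < f) : pvGcdRec f a b = Nat.gcd b a := by
  induction f generalizing a b with
  | zero => omega
  | succ f ih =>
    cases b with
    | zero => simp [pvGcdRec]
    | succ b =>
      rw [pvGcdRec, ih _ _ (by have := Nat.mod_lt a (y := b + 1) (by omega); omega)]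
      rw [Nat.gcd_succ]

lemma pvGcd_eq (x y : Int) : pvGcd x y = (Int.gcd x y : Int) := by
  unfold pvGcd
  rw [pvGcdRec_eq _ _ _ (Nat.lt_succ_self _), Nat.gcd_comm]
  rfl

lemma pvGcd_pos (x a : Int) (ha : 0 < a) : 0 < (Int.gcd x a : Int) := by
  have h : Int.gcd x a ≠ 0 := by
    intro h
    rw [Int.gcd_eq_zero_iff] at h
    omega
  exact_mod_cast Nat.pos_of_ne_zero h

lemma ediv_gcd_pos (c a : Int) (ha : 0 < a) : 0 < a / (Int.gcd c a : Int) := by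
  have hg := pvGcd_pos c a ha
  have hdvd : (Int.gcd c a : Int) ∣ a := Int.gcd_dvd_right c a
  by_contra hle
  rw [not_lt] at hle
  nlinarith [Int.ediv_mul_cancel hdvd]

lemma ediv_gcd_dvd (c a : Int) : a / (Int.gcd c a : Int) ∣ a :=
  ⟨(Int.gcd c a : Int), (Int.ediv_mul_cancel (Int.gcd_dvd_right c a)).symm⟩

lemma key_dvd (a c k : Int) (ha : 0 < a) : a ∣ c * k ↔ a / (Int.gcd c a : Int) ∣ k := by
  have hg := pvGcd_pos c a ha
  have hca : (Int.gcd c a : Int) ∣ c := Int.gcd_dvd_left c a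
  have haa : (Int.gcd c a : Int) ∣ a := Int.gcd_dvd_right c a
  have hco : IsCoprime (a / (Int.gcd c a : Int)) (c / (Int.gcd c a : Int)) := by
    rw [Int.isCoprime_iff_gcd_eq_one, Int.gcd_comm]
    exact Int.gcd_div_gcd_div_gcd (by exact_mod_cast hg)
  constructor
  · intro h
    have h2 : (Int.gcd c a : Int) * (a / (Int.gcd c a : Int)) ∣
        (Int.gcd c a : Int) * ((c / (Int.gcd c a : Int)) * k) := by
      rw [Int.mul_ediv_cancel' haa, ← mul_assoc, Int.mul_ediv_cancel' hca]
      exact h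
    have h3 := (mul_dvd_mul_iff_left hg.ne').mp h2
    exact hco.dvd_of_dvd_mul_left h3
  · intro h
    obtain ⟨t, ht⟩ := h
    refine ⟨(c / (Int.gcd c a : Int)) * t, ?_⟩
    calc c * k = c * ((a / (Int.gcd c a : Int)) * t) := by rw [← ht]
    _ = ((Int.gcd c a : Int) * (c / (Int.gcd c a : Int))) * ((a / (Int.gcd c a : Int)) * t) := by
          rw [Int.mul_ediv_cancel' hca]
    _ = ((Int.gcd c a : Int) * (a / (Int.gcd c a : Int))) * ((c / (Int.gcd c a : Int)) * t) := by
          ring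
    _ = a * ((c / (Int.gcd c a : Int)) * t) := by rw [Int.mul_ediv_cancel' haa]

lemma pvPeriod_spec (c o a : Int) (ha : 0 < a) :
    0 < pvPeriod c o a ∧ pvPeriod c o a ∣ a ∧
      ∀ k : Int, (a ∣ c * k ∧ a ∣ o * k) ↔ pvPeriod c o a ∣ k := by
  have hgc := pvGcd_pos c a ha
  have hgo := pvGcd_pos o a ha
  set pc := a / (Int.gcd c a : Int) with hpc
  set po := a / (Int.gcd o a : Int) with hpo
  have hpc0 : 0 < pc := ediv_gcd_pos c a ha
  have hpo0 : 0 < po := ediv_gcd_pos o a ha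
  have hg2 : 0 < (Int.gcd pc po : Int) := by
    have h : Int.gcd pc po ≠ 0 := by
      intro h; rw [Int.gcd_eq_zero_iff] at h; omega
    exact_mod_cast Nat.pos_of_ne_zero h
  have hmul : (Int.gcd pc po : Int) * (Int.lcm pc po : Int) = pc * po := by
    have h1 := Int.gcd_mul_lcm pc po
    have h2 : ((Int.gcd pc po * Int.lcm pc po : Nat) : Int) =
        ((pc.natAbs * po.natAbs : Nat) : Int) := by rw [h1]
    push_cast at h2
    rw [abs_of_nonneg hpc0.le, abs_of_nonneg hpo0.le] at h2
    exact h2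
  have hP : pvPeriod c o a = (Int.lcm pc po : Int) := by
    unfold pvPeriod
    simp only [pvGcd_eq]
    rw [PySem.Int.floordiv_eq_ediv_of_pos hgc, PySem.Int.floordiv_eq_ediv_of_pos hgo]
    rw [← hpc, ← hpo, PySem.Int.floordiv_eq_ediv_of_pos hg2, ← hmul,
      Int.mul_ediv_cancel_left _ hg2.ne']
  have hlcm0 : 0 < (Int.lcm pc po : Int) := by
    rcases Nat.eq_zero_or_pos (Int.lcm pc po) with h | h
    · exfalso
      rw [h] at hmul
      push_cast at hmul
      nlinarith
    · exact_mod_cast h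
  refine ⟨hP ▸ hlcm0, hP ▸ Int.coe_lcm_dvd (ediv_gcd_dvd c a) (ediv_gcd_dvd o a), fun k => ?_⟩
  rw [hP, key_dvd a c k ha, key_dvd a o k ha, ← hpc, ← hpo]
  constructor
  · exact fun h => Int.coe_lcm_dvd h.1 h.2
  · exact fun h => ⟨dvd_trans (Int.dvd_lcm_left pc po) h, dvd_trans (Int.dvd_lcm_right pc po) h⟩

lemma cond_iff (c o a k : Int) (ha : 0 < a) :
    (PySem.Int.mod (c * k) a = PySem.Int.mod (o * k) a ∧ PySem.Int.mod (c * k) a = 0) ↔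
      pvPeriod c o a ∣ k := by
  rw [← (pvPeriod_spec c o a ha).2.2 k]
  constructor
  · rintro ⟨h1, h2⟩
    exact ⟨(PySem.Int.mod_eq_zero_iff_dvd _ _).mp h2,
           (PySem.Int.mod_eq_zero_iff_dvd _ _).mp (h1 ▸ h2)⟩
  · rintro ⟨h1, h2⟩
    rw [(PySem.Int.mod_eq_zero_iff_dvd _ _).mpr h1, (PySem.Int.mod_eq_zero_iff_dvd _ _).mpr h2]
    exact ⟨rfl, rfl⟩

lemma maskA_eq_maskB (c o off a idx : Int) (ha : 0 < a) :
    pvMaskA c o off a idx = pvMaskB c o off a idx := by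
  have hmm : ∀ x : Int, x % a % a = x % a := fun x => Int.emod_emod_of_dvd x dvd_rfl
  simp only [pvMaskA, pvMaskB, PySem.Int.mod_eq_emod_of_pos ha, hmm]

lemma foldl_pair_append {α β γ : Type} (f : α → β) (g : α → γ) :
    ∀ (l : List α) (s1 : List β) (s2 : List γ),
      l.foldl (fun p x => (p.1 ++ [f x], p.2 ++ [g x])) (s1, s2) = (s1 ++ l.map f, s2 ++ l.map g)
  | [], s1, s2 => by simp
  | x :: l, s1, s2 => by
    simp only [List.foldl_cons, List.map_cons, foldl_pair_append f g l]
    simp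

lemma buildB_eq (c o off a P : Int) :
    pvBuildB c o off a P =
      ((PySem.List.pyRange 0 P 1).map (fun idx => off + o * idx),
       (PySem.List.pyRange 0 P 1).map (pvMaskB c o off a)) := by
  unfold pvBuildB pvMaskB
  exact foldl_pair_append _ _ _ [] []

lemma innerA_run (c o off a : Int) (ha : 0 < a) :
    ∀ (n : Nat) (j : Int), (pvPeriod c o a - j).toNat = n → 1 ≤ j → j ≤ pvPeriod c o a →
    ∀ (mv : List (List Int)) (so : List Int) (li : Int) (iol : List Int),
      iol.headD 0 = 0 → iol ≠ [] →
      pvInnerA c o off a (PySem.List.pyRange j a 1) mv so li iol =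
        (mv ++ (PySem.List.pyRange j (pvPeriod c o a) 1).map (pvMaskA c o off a),
         so ++ (PySem.List.pyRange j (pvPeriod c o a) 1).map (fun i => off + o * i),
         if pvPeriod c o a < a then pvPeriod c o a else if j < a then a else li) := by
  have hspec := pvPeriod_spec c o a ha
  set P := pvPeriod c o a with hPdef
  intro n
  induction n with
  | zero =>
    intro j hn h1j hjP mv so li iol hhead hne
    have hjeq : j = P := by omega
    subst hjeq
    obtain ⟨y, ys, rfl⟩ : ∃ y ys, iol = y :: ys := by
      cases iol with
      | nil => exact absurd rfl hne
      | cons y ys => exact ⟨y, ys, rfl⟩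
    have hy : y = 0 := hhead
    by_cases hPa : P < a
    · rw [PySem.List.pyRange_one_cons hPa]
      rw [pvInnerA]
      have hcond := (cond_iff c o a P ha).mpr dvd_rfl
      simp only [List.cons_append, List.length_cons, List.length_append, List.length_cons,
        List.length_nil, List.headD_cons]
      rw [if_neg (by omega), if_pos ⟨hcond.1, by rw [hcond.2, hy]⟩]
      rw [PySem.List.pyRange_one_eq_nil le_rfl]
      simp [hPa]
    · have hPea : P = a := le_antisymm (Int.le_of_dvd ha hspec.2.1) (not_lt.mp hPa)
      rw [PySem.List.pyRange_one_eq_nil (le_of_eq hPea.symm)]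
      rw [pvInnerA, PySem.List.pyRange_one_eq_nil le_rfl]
      simp [hPa]
  | succ n ih =>
    intro j hn h1j hjP mv so li iol hhead hne
    have hjP' : j < P := by omega
    have hja : j < a := lt_of_lt_of_le hjP' (Int.le_of_dvd ha hspec.2.1)
    obtain ⟨y, ys, rfl⟩ : ∃ y ys, iol = y :: ys := by
      cases iol with
      | nil => exact absurd rfl hne
      | cons y ys => exact ⟨y, ys, rfl⟩
    have hy : y = 0 := hhead
    rw [PySem.List.pyRange_one_cons hja]
    rw [pvInnerA]
    simp only [List.cons_append, List.length_cons, List.length_append, List.length_nil,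
      List.headD_cons]
    rw [if_neg (by omega)]
    have hnot : ¬ (PySem.Int.mod (c * j) a = PySem.Int.mod (o * j) a ∧
        PySem.Int.mod (c * j) a = y) := by
      rintro ⟨h1, h2⟩
      have hdvd := (cond_iff c o a j ha).mp ⟨h1, by rw [h2, hy]⟩
      have := Int.le_of_dvd (by omega) hdvd
      omega
    rw [if_neg hnot]
    rw [ih (j + 1) (by omega) (by omega) (by omega) _ _ a _ (by simp [hy]) (by simp)]
    rw [PySem.List.pyRange_one_cons hjP']
    simp only [List.map_cons, List.append_assoc, List.cons_append,
      List.nil_append, Prod.mk.injEq, true_and]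
    by_cases hPlt : P < a
    · simp [hPlt]
    · simp [hPlt, hja]

lemma innerA_full (c o off a : Int) (ha : 0 < a) :
    pvInnerA c o off a (PySem.List.pyRange 0 a 1) [] [] 0 [] =
      ((PySem.List.pyRange 0 (pvPeriod c o a) 1).map (pvMaskA c o off a),
       (PySem.List.pyRange 0 (pvPeriod c o a) 1).map (fun i => off + o * i),
       if pvPeriod c o a < a then pvPeriod c o a else if 1 < a then a else 0) := by
  have hspec := pvPeriod_spec c o a ha
  have hmod0 : PySem.Int.mod (c * 0) a = 0 := by
    rw [mul_zero, PySem.Int.mod_eq_emod_of_pos ha, Int.zero_emod]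
  rw [PySem.List.pyRange_one_cons ha]
  rw [pvInnerA]
  rw [hmod0]
  simp only [List.nil_append, List.length_cons, List.length_nil, if_true, zero_add]
  rw [innerA_run c o off a ha (pvPeriod c o a - 1).toNat 1 rfl le_rfl (by omega) _ _ _ _
    (by simp) (by simp)]
  rw [PySem.List.pyRange_one_cons hspec.1]
  simp [List.map_cons]

lemma elt_eq (c o off a : Int) (hne1 : a ≠ 1) :
    (pvInnerA c o off a (PySem.List.pyRange 0 a 1) [] [] 0 []).2.2 =
        (if 1 ≤ a then pvPeriod c o a else 0) ∧
      (pvInnerA c o off a (PySem.List.pyRange 0 a 1) [] [] 0 []).2.1 =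
        (pvBuildB c o off a (if 1 ≤ a then pvPeriod c o a else 0)).1 ∧
      (pvInnerA c o off a (PySem.List.pyRange 0 a 1) [] [] 0 []).1 =
        (pvBuildB c o off a (if 1 ≤ a then pvPeriod c o a else 0)).2 := by
  by_cases ha : 1 ≤ a
  · have ha0 : 0 < a := ha
    have hspec := pvPeriod_spec c o a ha0
    rw [innerA_full c o off a ha0, if_pos ha, buildB_eq]
    refine ⟨?_, rfl, ?_⟩
    · by_cases hPlt : pvPeriod c o a < a
      · simp [hPlt]
      · have he : pvPeriod c o a = a := le_antisymm (Int.le_of_dvd ha0 hspec.2.1)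
          (not_lt.mp hPlt)
        simp only [if_neg hPlt]
        rw [if_pos (by omega), he]
    · exact List.map_congr_left fun idx _ => maskA_eq_maskB c o off a idx ha0
  · have hle : a ≤ 0 := by omega
    rw [PySem.List.pyRange_one_eq_nil hle, if_neg ha, pvInnerA]
    rw [buildB_eq, PySem.List.pyRange_one_eq_nil le_rfl]
    exact ⟨rfl, rfl, rfl⟩

lemma outerA_run (dim : Int) (output_shape : List Int) (a : Int) (hne1 : a ≠ 1) :
    ∀ (sl : List (List Int)) (off : Int) (ll : List Int) (sa : List (List Int))
      (ma : List (List (List Int))),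
      (sl.foldl (pvStepA dim output_shape a) (off, ll, sa, ma)).2 =
        (ll ++ (pvAltGo dim output_shape a sl off).1,
         sa ++ (pvAltGo dim output_shape a sl off).2.1,
         ma ++ (pvAltGo dim output_shape a sl off).2.2)
  | [], off, ll, sa, ma => by simp [pvAltGo]
  | shape :: rest, off, ll, sa, ma => by
    rw [List.foldl_cons]
    have he := elt_eq (PySem.List.pyGetD shape dim 0) (PySem.List.pyGetD output_shape dim 0)
      off a hne1
    rw [show pvStepA dim output_shape a (off, ll, sa, ma) shape =
        (off + PySem.List.pyGetD shape dim 0,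
         ll ++ [(if 1 ≤ a then pvPeriod (PySem.List.pyGetD shape dim 0)
             (PySem.List.pyGetD output_shape dim 0) a else 0)],
         sa ++ [(pvBuildB (PySem.List.pyGetD shape dim 0)
             (PySem.List.pyGetD output_shape dim 0) off a
             (if 1 ≤ a then pvPeriod (PySem.List.pyGetD shape dim 0)
               (PySem.List.pyGetD output_shape dim 0) a else 0)).1],
         ma ++ [(pvBuildB (PySem.List.pyGetD shape dim 0)
             (PySem.List.pyGetD output_shape dim 0) off a
             (if 1 ≤ a then pvPeriod (PySem.List.pyGetD shape dim 0)
               (PySem.List.pyGetD output_shape dim 0) a else 0)).2]) from by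
      simp only [pvStepA]
      rw [he.1, he.2.1, he.2.2]]
    rw [outerA_run dim output_shape a hne1 rest]
    simp [pvAltGo, List.append_assoc]

lemma period_a1 (c o : Int) : pvPeriod c o 1 = 1 := by
  unfold pvPeriod
  simp only [pvGcd_eq, Int.gcd_one_right]
  decide

lemma a1_first_A (dim : Int) (os : List Int) :
    ∀ (sl : List (List Int)) (off : Int) (ll : List Int) (sa : List (List Int))
      (ma : List (List (List Int))),
      (sl.foldl (pvStepA dim os 1) (off, ll, sa, ma)).2.1 = ll ++ sl.map (fun _ => (0 : Int))
  | [], off, ll, sa, ma => by simp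
  | shape :: rest, off, ll, sa, ma => by
    rw [List.foldl_cons]
    have hfull := innerA_full (PySem.List.pyGetD shape dim 0) (PySem.List.pyGetD os dim 0)
      off 1 one_pos
    rw [period_a1] at hfull
    simp only [pvStepA]
    rw [hfull]
    simp only [lt_irrefl, if_false]
    rw [a1_first_A dim os rest]
    simp [List.append_assoc]

lemma a1_first_B (dim : Int) (os : List Int) :
    ∀ (sl : List (List Int)) (off : Int),
      (pvAltGo dim os 1 sl off).1 = sl.map (fun _ => (1 : Int))
  | [], _ => rfl
  | s :: rest, off => by
    simp only [pvAltGo, period_a1, if_pos (le_refl (1 : Int)), List.map_cons]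
    rw [a1_first_B dim os rest]

-- ===== VERDICT (by name: the statement is the Claim_ definition above) =====
theorem get_offset_and_mask_spec : Claim_unchanged_get_offset_and_mask := by
  intro dim sl os a _ _ hnd
  have hcase : a ≠ 1 ∨ sl = [] := by
    unfold D_get_offset_and_mask at hnd
    by_cases h : a = 1
    · right; by_contra hne; exact hnd ⟨h, hne⟩
    · left; exact h
  rcases hcase with hne | rfl
  · unfold get_offset_and_mask get_offset_and_mask_alt
    rw [PySem.List.foldl_pyRange_zero_pyGetD' sl [] (pvStepA dim os a) (0, [], [], [])]
    have h := outerA_run dim os a hne sl 0 [] [] []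
    simp only [List.nil_append] at h
    simp only [h, Prod.mk.eta]
  · unfold get_offset_and_mask get_offset_and_mask_alt
    rw [PySem.List.foldl_pyRange_zero_pyGetD' ([] : List (List Int)) [] (pvStepA dim os a)
      (0, [], [], [])]
    rfl
theorem get_offset_and_mask_changed : Claim_changed_get_offset_and_mask := by
  unfold Claim_changed_get_offset_and_mask; decide
theorem get_offset_and_mask_tight : Claim_exact_get_offset_and_mask := by
  intro dim sl os a _ _ hd heq
  obtain ⟨rfl, hne⟩ := hd
  cases sl with
  | nil => exact hne rfl
  | cons s rest =>
    have h1 := congrArg (fun t => t.1) heq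
    simp only [get_offset_and_mask, get_offset_and_mask_alt] at h1
    rw [PySem.List.foldl_pyRange_zero_pyGetD' (s :: rest) [] (pvStepA dim os 1)
      (0, [], [], [])] at h1
    rw [a1_first_A dim os (s :: rest) 0 [] [] [], a1_first_B dim os (s :: rest) 0] at h1
    simp at h1
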